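-- pv_equiv track=rewrite | github.com/schnwil/YAI | Convert/Converter.py | _tabularizeDataHR
-- ===== SOURCE A (Python) =====
-- def _padHex(hexStr):
--     if len(hexStr) % 2:
--         hexStr = '0' + hexStr
--     return hexStr
--
-- def _tabKey(symbol, bgColor, fgColor=''):
--     return symbol + bgColor + fgColor
--
-- def _tabularizeDataHR(data, xWidth):
--     pix = {}
--
--     i = 0
--     chunknum = 0
--     prevKey = ''
--     curKey = ''
--
--     while i < len(data):
--         chunknum = chunknum + 1
--         symbol = data[i:i+2]
--         bgColor = ''
--         fgColor = ''
--         cords = [_padHex(hex(chunknum%xWidth)[2:]), _padHex(hex(int(chunknum/xWidth)+1)[2:])]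
--
--         if cords[0] == '00':
--             cords[0] = _padHex(hex(xWidth)[2:])
--             cords[1] = _padHex(hex(int(chunknum/xWidth))[2:])
--
--         if symbol == '00':
--             bgColor = data[i+2:i+4]
--             curKey = _tabKey(symbol, bgColor)
--             prevKey = curKey
--
--             if pix.get(curKey) == None:
--                 pix[curKey] = [cords]
--             else:
--                 pix[curKey].append(cords)
--             i = i + 4
--
--         elif symbol != 'FF':
--             bgColor = data[i+2:i+4]
--             fgColor = data[i+4:i+6]
--             curKey = _tabKey(symbol, bgColor, fgColor)
--             prevKey = curKey
--
--             if pix.get(curKey) == None: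
--                 pix[curKey] = [cords]
--             else:
--                 pix[curKey].append(cords)
--             i = i + 6
--
--         else: #symbol == 'FF'
--             pix[prevKey].append(cords)
--             i = i + 2
--
--     return pix
-- ===== SOURCE B (Python) =====
-- def _padHex(hexStr):
--     if len(hexStr) % 2:
--         hexStr = '0' + hexStr
--     return hexStr
--
-- def _cords(chunknum, xWidth):
--     x = _padHex(hex(chunknum % xWidth)[2:])
--     if x == '00':
--         return [_padHex(hex(xWidth)[2:]), _padHex(hex(int(chunknum / xWidth))[2:])]
--     return [x, _padHex(hex(int(chunknum / xWidth) + 1)[2:])]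
--
-- def _tokenize(data):
--     # one token per chunk: None for a 'FF' repeat chunk, else the full key string
--     toks = []
--     i = 0
--     n = len(data)
--     while i < n:
--         s = data[i:i+2]
--         if s == 'FF':
--             toks.append(None)
--             i += 2
--         elif s == '00':
--             toks.append(s + data[i+2:i+4])
--             i += 4
--         else:
--             toks.append(s + data[i+2:i+4] + data[i+4:i+6])
--             i += 6
--     return toks
--
-- def _tabularizeDataHR(data, xWidth):
--     # pass 1: tokenize; pass 2: resolve each token to its key; pass 3: fold into dict
--     entries = []
--     prevKey = ''
--     for idx, tok in enumerate(_tokenize(data)):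
--         key = prevKey if tok is None else tok
--         prevKey = key
--         entries.append((key, _cords(idx + 1, xWidth)))
--     pix = {}
--     for key, cords in entries:
--         pix.setdefault(key, []).append(cords)
--     return pix
-- ===== Notes on version B (the rewrite author's own statement) =====
-- stated objective: alternative
-- what changed: A's single interleaved while-loop (index arithmetic, dict updates and prevKey tracking all in one body) is decomposed into three passes: tokenize the hex stream into one record per chunk, resolve each record to its key (reusing prevKey for 'FF' repeat chunks) with coordinates computed from its enumerate index, then fold the (key, cords) entries into the dict with setdefault.
-- outside the precondition, e.g. on _tabularizeDataHR('ab', 0): A raises ZeroDivisionError, B raises ZeroDivisionError; on _tabularizeDataHR('FFab', 2): A raises KeyError, B returns {'': [['01', '01']], 'ab': [['02', '01']]}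
import Mathlib
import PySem

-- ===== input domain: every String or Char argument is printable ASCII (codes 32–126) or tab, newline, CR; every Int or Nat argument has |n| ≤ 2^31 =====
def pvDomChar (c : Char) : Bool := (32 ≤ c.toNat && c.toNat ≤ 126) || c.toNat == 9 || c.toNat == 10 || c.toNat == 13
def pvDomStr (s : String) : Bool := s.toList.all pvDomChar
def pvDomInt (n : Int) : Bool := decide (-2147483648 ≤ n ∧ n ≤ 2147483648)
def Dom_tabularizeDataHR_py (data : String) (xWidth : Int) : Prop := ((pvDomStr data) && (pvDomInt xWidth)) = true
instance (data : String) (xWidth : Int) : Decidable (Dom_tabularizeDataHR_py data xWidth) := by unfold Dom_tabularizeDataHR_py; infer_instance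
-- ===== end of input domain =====

-- B re-implements the parser as tokenize → resolve keys → fold into the dict (three passes)
-- instead of A's single interleaved while-loop; objective: alternative decomposition, same cost.

-- ===== shared helpers (both Pythons use _padHex and hex(n)[2:]) =====

-- one lowercase hex digit
def hexDigit (n : Nat) : Char := if n < 10 then Char.ofNat (48 + n) else Char.ofNat (87 + n)

-- lowercase hex digits of a positive Nat, most significant first (accumulator form)
def hexNatAux : Nat → List Char → List Char
  | 0, acc => acc
  | n + 1, acc => hexNatAux ((n + 1) / 16) (hexDigit ((n + 1) % 16) :: acc)
decreasing_by exact Nat.div_lt_self (Nat.succ_pos n) (by omega)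

-- hex(n) for n : Nat without the '0x' prefix ('0' for 0)
def hexNat (n : Nat) : List Char := if n = 0 then ['0'] else hexNatAux n []

-- Python hex(n)[2:] : for n < 0, hex(n) = '-0x…' so [2:] keeps a leading 'x'
def pyHexTail (n : Int) : List Char := if n < 0 then 'x' :: hexNat (-n).toNat else hexNat n.toNat

-- _padHex
def padHex (s : List Char) : List Char := if s.length % 2 = 1 then '0' :: s else s

-- ===== PORT A =====

-- the while-loop of A; chunknum is incremented at the top of each iteration.
-- int(chunknum/xWidth) is ported as Int.tdiv (truncation toward zero): exact, since CPython's
-- float division is exactly-truncatable for |chunknum|,|xWidth| < 2^53 (Dom bounds xWidth by 2^31).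
def aLoop (cs : List Char) (xWidth : Int) (i : Nat) (chunknum : Int) (prevKey : String)
    (pix : PySem.Dict String (List (List String))) : PySem.Dict String (List (List String)) :=
  if h : i < cs.length then
    let c := chunknum + 1
    let symbol := PySem.List.slice cs (some (i : Int)) (some ((i : Int) + 2))
    let c0 := padHex (pyHexTail (PySem.Int.mod c xWidth))
    let c1 := padHex (pyHexTail (Int.tdiv c xWidth + 1))
    let cords :=
      if c0 = ['0', '0'] then
        [String.ofList (padHex (pyHexTail xWidth)), String.ofList (padHex (pyHexTail (Int.tdiv c xWidth)))]
      else [String.ofList c0, String.ofList c1]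
    if symbol = ['0', '0'] then
      let bg := PySem.List.slice cs (some ((i : Int) + 2)) (some ((i : Int) + 4))
      let curKey := String.ofList (symbol ++ bg)
      let pix' := match pix.get? curKey with
        | none => pix.insert curKey [cords]
        | some v => pix.insert curKey (v ++ [cords])
      aLoop cs xWidth (i + 4) c curKey pix'
    else if symbol ≠ ['F', 'F'] then
      let bg := PySem.List.slice cs (some ((i : Int) + 2)) (some ((i : Int) + 4))
      let fg := PySem.List.slice cs (some ((i : Int) + 4)) (some ((i : Int) + 6))
      let curKey := String.ofList (symbol ++ bg ++ fg)
      let pix' := match pix.get? curKey with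
        | none => pix.insert curKey [cords]
        | some v => pix.insert curKey (v ++ [cords])
      aLoop cs xWidth (i + 6) c curKey pix'
    else
      -- Python: pix[prevKey].append(cords) — KeyError when prevKey is absent (excluded by Pre_)
      let pix' := match pix.get? prevKey with
        | some v => pix.insert prevKey (v ++ [cords])
        | none => pix
      aLoop cs xWidth (i + 2) c prevKey pix'
  else pix
termination_by cs.length - i
decreasing_by all_goals omega

def tabularizeDataHR_py (data : String) (xWidth : Int) : List (String × List (List String)) :=
  (aLoop data.toList xWidth 0 0 "" PySem.Dict.empty).items

-- ===== PORT B =====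

-- _cords(chunknum, xWidth)
def cordsOf (chunknum xWidth : Int) : List String :=
  let x := padHex (pyHexTail (PySem.Int.mod chunknum xWidth))
  if x = ['0', '0'] then
    [String.ofList (padHex (pyHexTail xWidth)), String.ofList (padHex (pyHexTail (Int.tdiv chunknum xWidth)))]
  else [String.ofList x, String.ofList (padHex (pyHexTail (Int.tdiv chunknum xWidth + 1)))]

-- _tokenize: none for a 'FF' repeat chunk, else the full key string
def tokenize (cs : List Char) (i : Nat) : List (Option String) :=
  if h : i < cs.length then
    let s := PySem.List.slice cs (some (i : Int)) (some ((i : Int) + 2))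
    if s = ['F', 'F'] then none :: tokenize cs (i + 2)
    else if s = ['0', '0'] then
      some (String.ofList (s ++ PySem.List.slice cs (some ((i : Int) + 2)) (some ((i : Int) + 4)))) ::
        tokenize cs (i + 4)
    else
      some (String.ofList (s ++ PySem.List.slice cs (some ((i : Int) + 2)) (some ((i : Int) + 4)) ++
          PySem.List.slice cs (some ((i : Int) + 4)) (some ((i : Int) + 6)))) ::
        tokenize cs (i + 6)
  else []
termination_by cs.length - i
decreasing_by all_goals omega

-- pass 2: resolve each token to its key (reusing prevKey on none) and attach its cords
def resolve (xWidth : Int) : List (Option String) → Int → String → List (String × List String)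
  | [], _, _ => []
  | t :: ts, idx, prevKey =>
    let key := match t with | none => prevKey | some k => k
    (key, cordsOf (idx + 1) xWidth) :: resolve xWidth ts (idx + 1) key

-- pass 3: pix.setdefault(key, []).append(cords)
def bStep (pix : PySem.Dict String (List (List String))) (e : String × List String) :
    PySem.Dict String (List (List String)) :=
  pix.insert e.1 (pix.getD e.1 [] ++ [e.2])

def tabularizeDataHR_py_alt (data : String) (xWidth : Int) : List (String × List (List String)) :=
  ((resolve xWidth (tokenize data.toList 0) 0 "").foldl bStep PySem.Dict.empty).items

-- ===== PRECONDITION & SPEC =====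

-- Pre_ excludes exactly the inputs where A raises: xWidth = 0 with nonempty data
-- (ZeroDivisionError at chunknum % xWidth) and data starting with 'FF'
-- (KeyError: pix[''] on the first chunk).
def Pre_tabularizeDataHR_py (data : String) (xWidth : Int) : Prop :=
  data = "" ∨ (xWidth ≠ 0 ∧ PySem.Str.startswith data "FF" = false)
instance (data : String) (xWidth : Int) : Decidable (Pre_tabularizeDataHR_py data xWidth) := by
  unfold Pre_tabularizeDataHR_py; infer_instance

def pvWitness_tabularizeDataHR_py : String × Int := ("00ab12cdefFF", 3)

def Spec_tabularizeDataHR_py (data : String) (xWidth : Int) (out : List (String × List (List String))) : Prop := out = tabularizeDataHR_py_alt data xWidth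
instance (data : String) (xWidth : Int) (out : List (String × List (List String))) : Decidable (Spec_tabularizeDataHR_py data xWidth out) := by unfold Spec_tabularizeDataHR_py; infer_instance

-- ===== CLAIM (what is proved, stated in full; the proofs are below) =====
def Claim_equal_tabularizeDataHR_py : Prop := ∀ (data : String) (xWidth : Int), Dom_tabularizeDataHR_py data xWidth → Pre_tabularizeDataHR_py data xWidth → Spec_tabularizeDataHR_py data xWidth (tabularizeDataHR_py data xWidth)

-- ===== LEMMAS AND PROOFS =====

-- A's loop body applied to one chunk equals B's bStep on the corresponding entry
lemma step_eq (pix : PySem.Dict String (List (List String))) (k : String) (cords : List String) :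
    (match pix.get? k with
      | none => pix.insert k [cords]
      | some v => pix.insert k (v ++ [cords])) = bStep pix (k, cords) := by
  unfold bStep
  cases h : pix.get? k with
  | none => simp [PySem.Dict.getD_eq_get?_getD, h]
  | some v => simp [PySem.Dict.getD_eq_get?_getD, h]

-- the central invariant: A's interleaved loop from any state equals B's fold of the
-- resolved entries of the remaining tokens, provided prevKey is a live key of pix
-- (or prevKey = '' and the next token is not a 'FF' repeat)
-- A's inline cords expression is B's _cords
lemma cords_eq (c x : Int) :
    (if padHex (pyHexTail (PySem.Int.mod c x)) = ['0', '0'] then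
        [String.ofList (padHex (pyHexTail x)), String.ofList (padHex (pyHexTail (Int.tdiv c x)))]
      else [String.ofList (padHex (pyHexTail (PySem.Int.mod c x))),
        String.ofList (padHex (pyHexTail (Int.tdiv c x + 1)))]) = cordsOf c x := by
  rw [cordsOf]

lemma bStep_get_isSome (pix : PySem.Dict String (List (List String))) (k : String)
    (cords : List String) : ((bStep pix (k, cords)).get? k).isSome = true := by
  unfold bStep; rw [PySem.Dict.get?_insert_self]; rfl

-- the central invariant: A's interleaved loop from any state equals B's fold of the
-- resolved entries of the remaining tokens, provided prevKey is a live key of pix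
-- (or prevKey = '' and the next token is not a 'FF' repeat)
lemma loop_eq_fold (cs : List Char) (xWidth : Int) :
    ∀ (n i : Nat) (chunknum : Int) (prevKey : String)
      (pix : PySem.Dict String (List (List String))),
      cs.length - i ≤ n →
      ((pix.get? prevKey).isSome = true ∨
        (prevKey = "" ∧ (tokenize cs i).head? ≠ some none)) →
      aLoop cs xWidth i chunknum prevKey pix =
        (resolve xWidth (tokenize cs i) chunknum prevKey).foldl bStep pix := by
  intro n
  induction n with
  | zero =>
    intro i c prev pix hle _
    have hge : ¬ i < cs.length := by omega
    rw [aLoop, tokenize]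
    simp [hge, resolve]
  | succ n ih =>
    intro i c prev pix hle hinv
    by_cases h : i < cs.length
    · rw [aLoop, tokenize]
      simp only [dif_pos h]
      by_cases hFF : PySem.List.slice cs (some (i : Int)) (some ((i : Int) + 2)) = ['F', 'F']
      · -- FF chunk
        have h00 : ¬ PySem.List.slice cs (some (i : Int)) (some ((i : Int) + 2)) = ['0', '0'] := by
          rw [hFF]; decide
        rw [if_neg h00, if_neg (by simpa using hFF), if_pos hFF]
        obtain ⟨v, hv⟩ : ∃ v, pix.get? prev = some v := by
          rcases hinv with hs | ⟨-, hhd⟩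
          · exact Option.isSome_iff_exists.mp hs
          · exfalso; apply hhd; rw [tokenize]; simp [h, hFF]
        rw [hv, resolve]
        simp only [List.foldl_cons]
        have hb : bStep pix (prev, cordsOf (c + 1) xWidth) =
            pix.insert prev (v ++ [cordsOf (c + 1) xWidth]) := by
          rw [← step_eq, hv]
        rw [hb, cords_eq]
        exact ih (i + 2) (c + 1) prev _ (by omega)
          (Or.inl (by rw [PySem.Dict.get?_insert_self]; rfl))
      · by_cases h00 : PySem.List.slice cs (some (i : Int)) (some ((i : Int) + 2)) = ['0', '0']
        · rw [if_pos h00, if_neg hFF, if_pos h00, resolve]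
          simp only [List.foldl_cons]
          rw [cords_eq, step_eq]
          exact ih (i + 4) (c + 1) _ _ (by omega) (Or.inl (bStep_get_isSome _ _ _))
        · rw [if_neg h00, if_pos (by simpa using hFF), if_neg hFF, if_neg h00, resolve]
          simp only [List.foldl_cons]
          rw [cords_eq, step_eq]
          exact ih (i + 6) (c + 1) _ _ (by omega) (Or.inl (bStep_get_isSome _ _ _))
    · rw [aLoop, tokenize]
      simp [h, resolve]

theorem tabularizeDataHR_py_spec : Claim_equal_tabularizeDataHR_py := by
  intro data xWidth _ hpre
  unfold Spec_tabularizeDataHR_py tabularizeDataHR_py tabularizeDataHR_py_alt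
  congr 1
  apply loop_eq_fold data.toList xWidth data.toList.length 0 0 "" PySem.Dict.empty (by omega)
  right
  refine ⟨rfl, ?_⟩
  intro hhd
  rw [tokenize] at hhd
  by_cases h0 : 0 < data.toList.length
  · simp only [dif_pos h0] at hhd
    split_ifs at hhd with hFF h00
    · -- the first chunk is 'FF': contradicts Pre_
      have hne : data ≠ "" := by
        intro he; subst he; simp at h0
      have hsw : PySem.Str.startswith data "FF" = false := by
        rcases hpre with he | ⟨-, hs⟩
        · exact absurd he hne
        · exact hs
      have hpref : ['F', 'F'] <+: data.toList := by
        have : PySem.List.slice data.toList (some ((0 : Nat) : Int))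
            (some (((0 : Nat) : Int) + 2)) = data.toList.take 2 := by
          simp [PySem.List.slice_to]
        rw [this] at hFF
        rw [← hFF]
        exact List.take_prefix 2 data.toList
      have : PySem.Chars.startswith data.toList ['F', 'F'] = true :=
        (PySem.Chars.startswith_iff _ _).mpr hpref
      rw [PySem.Str.startswith] at hsw
      simp [this] at hsw
    · simp at hhd
    · simp at hhd
  · rw [dif_neg h0] at hhd
    simp at hhd
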